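-- pv_equiv track=rewrite | github.com/hansumane/advent_of_code | 2025/03/main.py | part1
-- ===== SOURCE A (Python) =====
-- def part1(batteries: list[list[int]]):
--     res = 0
--
--     for bat in batteries:
--         max_joltage = 0
--         for i in range(0, len(bat) - 1):
--             for j in range(i + 1, len(bat)):
--                 joltage = 10 * bat[i] + bat[j]
--                 if joltage > max_joltage:
--                     max_joltage = joltage
--         res += max_joltage
--
--     return res
-- ===== SOURCE B (Python) =====
-- def part1(batteries: list[list[int]]):
--     # One right-to-left pass per battery: the best partner for position i is the
--     # maximum element to its right, so keep a running suffix maximum.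
--     res = 0
--     for bat in batteries:
--         best = 0
--         suf = None  # max of the elements already seen (i.e. to the right)
--         for x in reversed(bat):
--             if suf is not None:
--                 cand = 10 * x + suf
--                 if cand > best:
--                     best = cand
--                 if x > suf:
--                     suf = x
--             else:
--                 suf = x
--         res += best
--     return res
-- ===== Notes on version B (the rewrite author's own statement) =====
-- stated objective: faster
-- what changed: Replaced the quadratic all-pairs scan per battery by a single right-to-left pass that keeps a running suffix maximum, since the best partner j>i is always the maximum element to the right of i.
import Mathlib
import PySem

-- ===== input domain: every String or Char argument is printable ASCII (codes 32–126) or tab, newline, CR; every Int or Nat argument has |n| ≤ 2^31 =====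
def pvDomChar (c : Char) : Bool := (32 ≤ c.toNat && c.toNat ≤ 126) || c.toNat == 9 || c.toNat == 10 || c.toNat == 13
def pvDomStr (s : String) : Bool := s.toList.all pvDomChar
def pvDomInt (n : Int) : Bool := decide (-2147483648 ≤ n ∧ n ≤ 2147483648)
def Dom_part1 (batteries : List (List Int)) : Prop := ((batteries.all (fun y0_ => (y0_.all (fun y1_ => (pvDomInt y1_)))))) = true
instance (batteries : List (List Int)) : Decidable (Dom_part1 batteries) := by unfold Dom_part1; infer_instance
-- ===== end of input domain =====

-- B replaces A's quadratic all-pairs scan per battery by a single right-to-left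
-- pass keeping a running suffix maximum (objective: faster).

-- ===== PORT A =====
-- per-battery nested loops: for i in range(0, len-1): for j in range(i+1, len): …
def part1Bat (bat : List Int) : Int :=
  (PySem.List.pyRange 0 ((bat.length : Int) - 1) 1).foldl (fun max_joltage i =>
    (PySem.List.pyRange (i + 1) (bat.length : Int) 1).foldl (fun max_joltage j =>
      let joltage := 10 * PySem.List.pyGetD bat i 0 + PySem.List.pyGetD bat j 0
      if joltage > max_joltage then joltage else max_joltage) max_joltage) 0

def part1 (batteries : List (List Int)) : Int :=
  batteries.foldl (fun res bat => res + part1Bat bat) 0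

-- ===== PORT B =====
-- loop body of B's inner 'for x in reversed(bat)'
def part1AltStep (st : Int × Option Int) (x : Int) : Int × Option Int :=
  match st with
  | (best, none) => (best, some x)
  | (best, some suf) =>
      let cand := 10 * x + suf
      ((if cand > best then cand else best), some (if x > suf then x else suf))

def part1AltBat (bat : List Int) : Int :=
  (bat.reverse.foldl part1AltStep (0, none)).1

def part1_alt (batteries : List (List Int)) : Int :=
  batteries.foldl (fun res bat => res + part1AltBat bat) 0

-- ===== PRECONDITION & SPEC =====
def Spec_part1 (batteries : List (List Int)) (out : Int) : Prop := out = part1_alt batteries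
instance (batteries : List (List Int)) (out : Int) : Decidable (Spec_part1 batteries out) := by unfold Spec_part1; infer_instance

-- ===== CLAIM (what is proved, stated in full; the proofs are below) =====
def Claim_equal_part1 : Prop := ∀ (batteries : List (List Int)), Dom_part1 batteries → Spec_part1 batteries (part1 batteries)

-- ===== LEMMAS AND PROOFS =====

-- the values 10*bat[i]+bat[j] over all pairs i<j, stated structurally
def pairVals : List Int → List Int
  | [] => []
  | x :: xs => xs.map (fun y => 10 * x + y) ++ pairVals xs

theorem if_gt_eq_max (m a : Int) : (if a > m then a else m) = max m a := by
  split <;> omega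

theorem foldl_max_max (l : List Int) (a : Int) :
    ∀ b, l.foldl max (max a b) = max a (l.foldl max b) := by
  induction l with
  | nil => intro b; rfl
  | cons x t ih =>
      intro b
      simp only [List.foldl_cons, max_assoc]
      exact ih (max b x)

theorem foldl_max_map_add (xs : List Int) (c : Int) :
    ∀ b, (xs.map (fun t => c + t)).foldl max (c + b) = c + xs.foldl max b := by
  induction xs with
  | nil => intro b; rfl
  | cons x t ih =>
      intro b
      simp only [List.map_cons, List.foldl_cons]
      rw [max_add_add_left c b x]
      exact ih (max b x)

-- reading bat[a], bat[a+1], … through getD is List.drop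
theorem map_getD_range (bat : List Int) :
    ∀ a : Nat, (List.range (bat.length - a)).map (fun k => bat.getD (a + k) 0) = bat.drop a := by
  induction bat with
  | nil => intro a; simp
  | cons x xs ih =>
      intro a
      cases a with
      | zero =>
          simp only [List.length_cons, Nat.sub_zero, List.drop_zero]
          rw [List.range_succ_eq_map]
          simp only [List.map_cons, List.map_map, Nat.zero_add, List.getD_cons_zero]
          have h0 := ih 0
          simp only [Nat.sub_zero, List.drop_zero] at h0
          have hmap : (List.range xs.length).map ((fun k => (x :: xs).getD k 0) ∘ Nat.succ)
              = (List.range xs.length).map (fun k => xs.getD (0 + k) 0) := by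
            apply List.map_congr_left
            intro k _
            simp [Function.comp]
          rw [hmap, h0]
      | succ b =>
          simp only [List.length_cons, Nat.succ_sub_succ, List.drop_succ_cons]
          rw [← ih b]
          apply List.map_congr_left
          intro k _
          have h : b + 1 + k = (b + k) + 1 := by omega
          rw [h, List.getD_cons_succ]

-- reading bat[a:] through pyGetD over an index range is List.drop
theorem drop_via_pyRange (bat : List Int) (a : Nat) :
    (PySem.List.pyRange ((a : Int)) (bat.length : Int) 1).map (fun j => PySem.List.pyGetD bat j 0)
      = bat.drop a := by
  rw [PySem.List.pyRange_one, List.map_map]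
  have h1 : ((bat.length : Int) - (a : Int)).toNat = bat.length - a := by omega
  rw [h1, ← map_getD_range bat a]
  apply List.map_congr_left
  intro k _
  have h2 : ((a : Int) + (k : Int)) = (((a + k : Nat)) : Int) := by push_cast; ring
  simp only [Function.comp, h2, PySem.List.pyGetD_natCast]

-- A's inner loop over j, for i = k, is a running max over the mapped tail
theorem inner_eq (bat : List Int) (k : Nat) (m : Int) :
    (PySem.List.pyRange ((k : Int) + 1) (bat.length : Int) 1).foldl (fun max_joltage j =>
        let joltage := 10 * PySem.List.pyGetD bat (k : Int) 0 + PySem.List.pyGetD bat j 0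
        if joltage > max_joltage then joltage else max_joltage) m
      = ((bat.drop (k + 1)).map (fun y => 10 * bat.getD k 0 + y)).foldl max m := by
  have h1 : ((k : Int) + 1) = (((k + 1 : Nat)) : Int) := by push_cast; ring
  rw [h1, ← drop_via_pyRange bat (k + 1), List.map_map, List.foldl_map]
  apply PySem.List.foldl_congr_mem
  intro acc j _
  simp [Function.comp, if_gt_eq_max, PySem.List.pyGetD_natCast]

-- the nested index loops, restated over Nat, compute the running max of pairVals
theorem a_nat (bat : List Int) :
    ∀ init : Int,
      (List.range (bat.length - 1)).foldl (fun m k =>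
        ((bat.drop (k + 1)).map (fun y => 10 * bat.getD k 0 + y)).foldl max m) init
      = (pairVals bat).foldl max init := by
  induction bat with
  | nil => intro init; simp [pairVals]
  | cons x xs ih =>
      intro init
      cases xs with
      | nil => simp [pairVals]
      | cons y ys =>
          simp only [List.length_cons, Nat.add_sub_cancel]
          rw [List.range_succ_eq_map, List.foldl_cons, List.foldl_map]
          simp only [Nat.succ_eq_add_one, List.drop_succ_cons, List.drop_zero,
            List.getD_cons_zero, List.getD_cons_succ]
          have ih' := ih (((y :: ys).map (fun z => 10 * x + z)).foldl max init)
          simp only [List.length_cons, Nat.add_sub_cancel, List.drop_succ_cons] at ih'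
          rw [ih']
          simp only [pairVals, List.foldl_append]

-- A's per-battery loops compute the running max of pairVals
theorem partA_eq (bat : List Int) : part1Bat bat = (pairVals bat).foldl max 0 := by
  cases bat with
  | nil => rfl
  | cons hd tl =>
      unfold part1Bat
      have hl : ((hd :: tl).length : Int) - 1 = ((tl.length : Nat) : Int) := by
        simp [List.length_cons]
      rw [hl, PySem.List.pyRange_zero_natCast, List.foldl_map]
      have hcong : ∀ (m : Int), ∀ k ∈ List.range tl.length,
          (PySem.List.pyRange ((k : Int) + 1) ((hd :: tl).length : Int) 1).foldl
            (fun max_joltage j =>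
              let joltage := 10 * PySem.List.pyGetD (hd :: tl) (k : Int) 0
                + PySem.List.pyGetD (hd :: tl) j 0
              if joltage > max_joltage then joltage else max_joltage) m
          = (((hd :: tl).drop (k + 1)).map (fun y => 10 * (hd :: tl).getD k 0 + y)).foldl max m :=
        fun m k _ => inner_eq (hd :: tl) k m
      rw [PySem.List.foldl_congr_mem _ _ _ _ hcong]
      have := a_nat (hd :: tl) 0
      simpa using this

def sufSpec : List Int → Option Int
  | [] => none
  | y :: ys => some (ys.foldl max y)

-- B's reversed scan: first component is the running max of pairVals,
-- second is the maximum of the elements seen so far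
theorem b_foldr (bat : List Int) :
    bat.foldr (fun x st => part1AltStep st x) ((0 : Int), (none : Option Int))
      = ((pairVals bat).foldl max 0, sufSpec bat) := by
  induction bat with
  | nil => rfl
  | cons x xs ih =>
      rw [List.foldr_cons, ih]
      cases xs with
      | nil => simp [part1AltStep, pairVals, sufSpec]
      | cons y ys =>
          simp only [part1AltStep, sufSpec, if_gt_eq_max]
          rw [Prod.mk.injEq]
          constructor
          · -- running max component
            have hin : (((y :: ys)).map (fun z => 10 * x + z)).foldl max 0
                = max 0 (10 * x + ys.foldl max y) := by
              simp only [List.map_cons, List.foldl_cons]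
              rw [foldl_max_max, foldl_max_map_add]
            simp only [pairVals, List.foldl_append, hin]
            rw [max_comm 0 (10 * x + ys.foldl max y), foldl_max_max]
            rw [max_comm, foldl_max_max]
          · -- suffix-max component
            simp only [List.foldl_cons]
            rw [foldl_max_max, max_comm]

theorem partB_eq (bat : List Int) : part1AltBat bat = (pairVals bat).foldl max 0 := by
  unfold part1AltBat
  rw [List.foldl_reverse, b_foldr]

theorem bat_eq (bat : List Int) : part1Bat bat = part1AltBat bat := by
  rw [partA_eq, partB_eq]

-- ===== VERDICT (by name: the statement is the Claim_ definition above) =====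
theorem part1_spec : Claim_equal_part1 := by
  intro bs _
  unfold Spec_part1 part1 part1_alt
  apply PySem.List.foldl_congr_mem
  intro acc bat _
  rw [bat_eq]
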